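-- pv_equiv track=rewrite | github.com/pavelcherepan/chord_visualisation | core/chord_shapes.py | _filter_shapes
-- ===== SOURCE A (Python) =====
-- def _filter_shapes(raw_shapes: list[tuple[tuple[int, int], ...]]):
--     # filter the resulting combinations such that:
--     #  - notes of a chord are no more than 3 frets apart
--     #  - all notes have to be on separate strings
--     unplayable_idx: list[int] = []
--     fret_ranges = list(map(lambda x:
--         max(f[1] for f in x) - min(f[1] for f in x), raw_shapes))
--     unplayable_idx = [idx for idx, i
--                       in enumerate(fret_ranges) if i >= 3]
--
--     # identify combinations where different
--     # notes are played on the same string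
--     different_strings = [
--         idx for idx, i in enumerate(raw_shapes)
--         if len({x[0] for x in i}) != len(i)
--     ]
--     unplayable_idx.extend(different_strings)
--
--     comb_filtered = [i for idx, i in enumerate(raw_shapes)
--                      if idx not in unplayable_idx]
--     # sort results in the order of strings
--     comb_filtered = [sorted(i, key=lambda x: x[0])
--                      for i in comb_filtered]
--     return comb_filtered
-- ===== SOURCE B (Python) =====
-- def _filter_shapes(raw_shapes: list[tuple[tuple[int, int], ...]]):
--     # Single pass: skip unplayable shapes directly, append the sorted survivors.
--     result = []
--     for shape in raw_shapes:
--         frets = [f[1] for f in shape]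
--         if max(frets) - min(frets) >= 3:
--             continue
--         if len({x[0] for x in shape}) != len(shape):
--             continue
--         result.append(sorted(shape, key=lambda x: x[0]))
--     return result
-- ===== Notes on version B (the rewrite author's own statement) =====
-- stated objective: simpler
-- what changed: Replaced the four index-table passes (fret-range map, two enumerate-based index lists, and an 'idx not in' membership filter) by one direct pass that skips an unplayable shape with continue and appends its sorted form immediately.
import Mathlib
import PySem

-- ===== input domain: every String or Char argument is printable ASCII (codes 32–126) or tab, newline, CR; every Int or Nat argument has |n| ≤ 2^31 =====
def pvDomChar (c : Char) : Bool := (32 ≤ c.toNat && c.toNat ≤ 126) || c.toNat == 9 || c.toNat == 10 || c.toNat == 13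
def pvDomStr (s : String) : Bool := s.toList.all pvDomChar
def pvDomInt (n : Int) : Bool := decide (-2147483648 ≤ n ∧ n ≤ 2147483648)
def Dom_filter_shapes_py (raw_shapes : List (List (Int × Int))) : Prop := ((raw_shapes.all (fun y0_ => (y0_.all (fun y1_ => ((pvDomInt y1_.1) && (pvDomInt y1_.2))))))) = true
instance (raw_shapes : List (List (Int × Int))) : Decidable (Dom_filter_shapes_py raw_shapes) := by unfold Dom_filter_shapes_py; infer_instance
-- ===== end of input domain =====

-- B replaces A's index-table passes (fret ranges, two index lists, 'idx not in' filter)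
-- by one direct pass that skips unplayable shapes and appends the sorted survivors: simpler.


-- ===== PORT A =====
-- max(...)  / min(...) of an empty generator raise ValueError in Python: max?/min? are none
-- exactly there; the .getD 0 guard only totalises the port, Pre_ excludes those inputs.
def filter_shapes_py (raw_shapes : List (List (Int × Int))) : List (List (Int × Int)) :=
  let fret_ranges : List Int := raw_shapes.map (fun x =>
    ((PySem.List.max? (x.map (fun f => f.2)) (fun v => v)).getD 0)
      - ((PySem.List.min? (x.map (fun f => f.2)) (fun v => v)).getD 0))
  let unplayable_idx : List Int :=
    ((PySem.List.enumerate fret_ranges).filter (fun p => decide (3 ≤ p.2))).map (fun p => p.1)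
  let different_strings : List Int :=
    ((PySem.List.enumerate raw_shapes).filter (fun p =>
      decide ((PySem.Set.ofList (p.2.map (fun x => x.1))).length ≠ p.2.length))).map (fun p => p.1)
  let unplayable := unplayable_idx ++ different_strings
  let comb_filtered : List (List (Int × Int)) :=
    ((PySem.List.enumerate raw_shapes).filter (fun p => decide (p.1 ∉ unplayable))).map (fun p => p.2)
  comb_filtered.map (fun i => PySem.List.sorted i (fun x => x.1) false)

-- ===== PORT B =====
-- single pass: skip (continue) on either condition, else append the sorted shape
def filter_shapes_py_alt (raw_shapes : List (List (Int × Int))) : List (List (Int × Int)) :=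
  raw_shapes.foldl (fun result shape =>
    let frets := shape.map (fun f => f.2)
    if 3 ≤ ((PySem.List.max? frets (fun v => v)).getD 0)
          - ((PySem.List.min? frets (fun v => v)).getD 0) then result
    else if (PySem.Set.ofList (shape.map (fun x => x.1))).length ≠ shape.length then result
    else result ++ [PySem.List.sorted shape (fun x => x.1) false]) []

-- ===== PRECONDITION & SPEC =====
-- Pre_ excludes inputs containing an empty shape: there Python A raises ValueError
-- (max() of an empty sequence), and Python B raises there too.
def Pre_filter_shapes_py (raw_shapes : List (List (Int × Int))) : Prop :=
  ∀ s ∈ raw_shapes, s ≠ []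
instance (raw_shapes : List (List (Int × Int))) : Decidable (Pre_filter_shapes_py raw_shapes) := by
  unfold Pre_filter_shapes_py; infer_instance
def pvWitness_filter_shapes_py : (List (List (Int × Int))) := [[(1,2),(2,3)],[(1,2),(1,5)]]

def Spec_filter_shapes_py (raw_shapes : List (List (Int × Int))) (out : List (List (Int × Int))) : Prop := out = filter_shapes_py_alt raw_shapes
instance (raw_shapes : List (List (Int × Int))) (out : List (List (Int × Int))) : Decidable (Spec_filter_shapes_py raw_shapes out) := by unfold Spec_filter_shapes_py; infer_instance

-- ===== CLAIM (what is proved, stated in full; the proofs are below) =====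
def Claim_equal_filter_shapes_py : Prop := ∀ (raw_shapes : List (List (Int × Int))), Dom_filter_shapes_py raw_shapes → Pre_filter_shapes_py raw_shapes → Spec_filter_shapes_py raw_shapes (filter_shapes_py raw_shapes)

-- ===== LEMMAS AND PROOFS =====

-- the condition (as a Bool on the shape) under which a shape is kept
def pvKeep (s : List (Int × Int)) : Bool :=
  !(3 ≤ ((PySem.List.max? (s.map (fun f => f.2)) (fun v => v)).getD 0)
        - ((PySem.List.min? (s.map (fun f => f.2)) (fun v => v)).getD 0) : Bool)
  && ((PySem.Set.ofList (s.map (fun x => x.1))).length == s.length)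

-- an index i is in the map-fst of a filtered enumerate iff the element at i satisfies P
lemma mem_map_fst_filter_enumerate {α : Type} (xs : List α) (s i : Int) (P : α → Bool) :
    i ∈ ((PySem.List.enumerate xs s).filter (fun p => P p.2)).map (fun p => p.1)
      ↔ ∃ k : Nat, ∃ h : k < xs.length, i = s + k ∧ P xs[k] := by
  simp only [List.mem_map, List.mem_filter, PySem.List.mem_enumerate_iff]
  constructor
  · rintro ⟨p, ⟨⟨k, hk, rfl⟩, hP⟩, rfl⟩
    exact ⟨k, hk, rfl, hP⟩
  · rintro ⟨k, hk, rfl, hP⟩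
    exact ⟨(s + k, xs[k]), ⟨⟨k, hk, rfl⟩, hP⟩, rfl⟩

-- a filter over enumerate whose index-predicate agrees pointwise with an element-predicate
lemma filter_enumerate_eq_filter {α : Type} (xs : List α) (s : Int) (C : Int → Bool) (Q : α → Bool)
    (h : ∀ k : Nat, ∀ hk : k < xs.length, C (s + k) = Q xs[k]) :
    ((PySem.List.enumerate xs s).filter (fun p => C p.1)).map (fun p => p.2) = xs.filter Q := by
  induction xs generalizing s with
  | nil => simp [PySem.List.enumerate_nil]
  | cons x t ih =>
    rw [PySem.List.enumerate_cons]
    have h0 : C s = Q x := by simpa using h 0 (by simp)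
    have hrest : ((PySem.List.enumerate t (s+1)).filter (fun p => C p.1)).map (fun p => p.2)
        = t.filter Q := by
      apply ih
      intro k hk
      have := h (k + 1) (by simpa using hk)
      simpa [add_assoc, add_comm, add_left_comm] using this
    by_cases hq : Q x
    · simp [h0, hq, hrest]
    · simp [h0, hq, hrest]

-- A equals filter-then-sort
lemma portA_eq (raw_shapes : List (List (Int × Int))) :
    filter_shapes_py raw_shapes
      = (raw_shapes.filter pvKeep).map (fun i => PySem.List.sorted i (fun x => x.1) false) := by
  show ((((PySem.List.enumerate raw_shapes 0).filter (fun p => decide (p.1 ∉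
      (((PySem.List.enumerate (raw_shapes.map (fun x =>
          ((PySem.List.max? (x.map (fun f => f.2)) (fun v => v)).getD 0)
            - ((PySem.List.min? (x.map (fun f => f.2)) (fun v => v)).getD 0))) 0).filter
          (fun p => decide (3 ≤ p.2))).map (fun p => p.1))
      ++ (((PySem.List.enumerate raw_shapes 0).filter (fun p =>
          decide ((PySem.Set.ofList (p.2.map (fun x => x.1))).length ≠ p.2.length))).map
          (fun p => p.1))))).map (fun p => p.2)).map
      (fun i => PySem.List.sorted i (fun x => x.1) false)) = _
  congr 1
  refine filter_enumerate_eq_filter raw_shapes 0 (fun i => decide (i ∉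
      (((PySem.List.enumerate (raw_shapes.map (fun x =>
          ((PySem.List.max? (x.map (fun f => f.2)) (fun v => v)).getD 0)
            - ((PySem.List.min? (x.map (fun f => f.2)) (fun v => v)).getD 0))) 0).filter
          (fun p => decide (3 ≤ p.2))).map (fun p => p.1))
      ++ (((PySem.List.enumerate raw_shapes 0).filter (fun p =>
          decide ((PySem.Set.ofList (p.2.map (fun x => x.1))).length ≠ p.2.length))).map
          (fun p => p.1)))) pvKeep ?_
  intro k hk
  simp only [zero_add]
  rw [Bool.eq_iff_iff, decide_eq_true_iff]
  have hmem1 : ((k : Int) ∈ ((PySem.List.enumerate (raw_shapes.map (fun x =>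
      ((PySem.List.max? (x.map (fun f => f.2)) (fun v => v)).getD 0)
        - ((PySem.List.min? (x.map (fun f => f.2)) (fun v => v)).getD 0))) 0).filter
        (fun p => decide (3 ≤ p.2))).map (fun p => p.1))
      ↔ (3 ≤ ((PySem.List.max? (raw_shapes[k].map (fun f => f.2)) (fun v => v)).getD 0)
        - ((PySem.List.min? (raw_shapes[k].map (fun f => f.2)) (fun v => v)).getD 0)) := by
    rw [mem_map_fst_filter_enumerate _ _ _ (fun v => decide ((3:Int) ≤ v))]
    constructor
    · rintro ⟨j, hj, hkj, hP⟩
      have : j = k := by omega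
      subst this
      simpa using hP
    · intro hP
      refine ⟨k, by simpa using hk, by simp, ?_⟩
      simpa using hP
  have hmem2 : ((k : Int) ∈ ((PySem.List.enumerate raw_shapes 0).filter (fun p =>
      decide ((PySem.Set.ofList (p.2.map (fun x => x.1))).length ≠ p.2.length))).map (fun p => p.1))
      ↔ ((PySem.Set.ofList (raw_shapes[k].map (fun x => x.1))).length ≠ raw_shapes[k].length) := by
    rw [mem_map_fst_filter_enumerate _ _ _ (fun sh : List (Int × Int) => decide ((PySem.Set.ofList (sh.map (fun x => x.1))).length ≠ sh.length))]
    constructor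
    · rintro ⟨j, hj, hkj, hP⟩
      have : j = k := by omega
      subst this
      simpa using hP
    · intro hP
      exact ⟨k, hk, by simp, by simpa using hP⟩
  constructor
  · intro hnot
    rw [List.mem_append, not_or] at hnot
    obtain ⟨h1, h2⟩ := hnot
    rw [hmem1] at h1
    rw [hmem2] at h2
    simp only [pvKeep, Bool.and_eq_true, Bool.not_eq_true', decide_eq_false_iff_not, beq_iff_eq]
    exact ⟨h1, by omega⟩
  · intro hkeep
    simp only [pvKeep, Bool.and_eq_true, Bool.not_eq_true', decide_eq_false_iff_not, beq_iff_eq] at hkeep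
    rw [List.mem_append, not_or, hmem1, hmem2]
    exact ⟨hkeep.1, by omega⟩

-- B's fold equals filter-then-sort
lemma portB_eq_aux (xs : List (List (Int × Int))) (acc : List (List (Int × Int))) :
    xs.foldl (fun result shape =>
      let frets := shape.map (fun f => f.2)
      if 3 ≤ ((PySem.List.max? frets (fun v => v)).getD 0)
            - ((PySem.List.min? frets (fun v => v)).getD 0) then result
      else if (PySem.Set.ofList (shape.map (fun x => x.1))).length ≠ shape.length then result
      else result ++ [PySem.List.sorted shape (fun x => x.1) false]) acc
    = acc ++ (xs.filter pvKeep).map (fun i => PySem.List.sorted i (fun x => x.1) false) := by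
  induction xs generalizing acc with
  | nil => simp
  | cons x t ih =>
    simp only [List.foldl_cons, List.filter_cons]
    by_cases h1 : (3 : Int) ≤ ((PySem.List.max? (x.map (fun f => f.2)) (fun v => v)).getD 0)
          - ((PySem.List.min? (x.map (fun f => f.2)) (fun v => v)).getD 0)
    · have hk : pvKeep x = false := by
        simp only [pvKeep, Bool.and_eq_false_iff]
        left; simpa using h1
      simp only [h1, if_pos, hk, Bool.false_eq_true, if_false, ih]
    · by_cases h2 : (PySem.Set.ofList (x.map (fun y => y.1))).length ≠ x.length
      · have hk : pvKeep x = false := by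
          simp only [pvKeep, Bool.and_eq_false_iff]
          right; simpa using h2
        simp only [h1, if_neg, if_pos h2, hk, Bool.false_eq_true, ih, not_false_iff]
      · have hk : pvKeep x = true := by
          simp only [pvKeep, Bool.and_eq_true, Bool.not_eq_true', decide_eq_false_iff_not,
            beq_iff_eq]
          exact ⟨by simpa using h1, by omega⟩
        simp only [if_neg h1, if_neg h2, hk, if_pos, ih, List.map_cons, List.append_assoc,
          List.singleton_append]

lemma portB_eq (raw_shapes : List (List (Int × Int))) :
    filter_shapes_py_alt raw_shapes
      = (raw_shapes.filter pvKeep).map (fun i => PySem.List.sorted i (fun x => x.1) false) := by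
  unfold filter_shapes_py_alt
  simpa using portB_eq_aux raw_shapes []

-- ===== VERDICT (by name: the statement is the Claim_ definition above) =====
theorem filter_shapes_py_spec : Claim_equal_filter_shapes_py := by
  intro raw_shapes _ _
  unfold Spec_filter_shapes_py
  rw [portA_eq, portB_eq]
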